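-- pv_equiv track=rewrite | github.com/learning-ljj/AletheiaReproduction | scripts/run_imobench.py | select_answerbench_diverse
-- ===== SOURCE A (Python) =====
-- def select_answerbench_diverse(data: list[dict], n: int = 30) -> list[dict]:
--     """从 answerbench_v2 全集按类别+子类别多样性选取 n 道题。
--
--     策略：均衡地从 Algebra、Combinatorics、Geometry、Number theory 四类中抽取，
--     同一类别内按 Subcategory 去重以保证子类别多样性。
--     """
--     from collections import defaultdict
--     main_cats = ["Algebra", "Combinatorics", "Geometry", "Number theory"]
--
--     # 按 category 分组，并在类别内按 subcategory 轮询
--     cat_groups: dict[str, list] = defaultdict(list)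
--     other: list[dict] = []
--     for item in data:
--         cat = item.get("category", "")
--         if cat in main_cats:
--             cat_groups[cat].append(item)
--         else:
--             other.append(item)
--
--     # 每类分配额度（尽量均等）
--     per_cat = n // len(main_cats)  # 7
--     extra   = n % len(main_cats)   # 2
--
--     selected: list[dict] = []
--     for i, cat in enumerate(main_cats):
--         quota = per_cat + (1 if i < extra else 0)
--         items = cat_groups[cat]
--         # 在类别内按 subcategory 轮询以保证子类别多样性
--         sub_groups: dict[str, list] = defaultdict(list)
--         for item in items:
--             sub_groups[item.get("subcategory", "")].append(item)
--         sub_queues = list(sub_groups.values())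
--         taken = 0
--         while taken < quota:
--             progress = False
--             for q in sub_queues:
--                 if q and taken < quota:
--                     selected.append(q.pop(0))
--                     taken += 1
--                     progress = True
--             if not progress:
--                 break
--
--     # 如果因类别不均等导致不足，从 other 补充
--     for item in other:
--         if len(selected) >= n:
--             break
--         selected.append(item)
--
--     return selected[:n]
-- ===== SOURCE B (Python) =====
-- def select_answerbench_diverse(data: list[dict], n: int = 30) -> list[dict]:
--     """Balanced selection: same quotas as A, but each category's round-robin
--     order is materialised once by flattening the subcategory groups column by
--     column, then sliced to the quota; the 'other' top-up is a slice too."""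
--     from collections import defaultdict
--     main_cats = ["Algebra", "Combinatorics", "Geometry", "Number theory"]
--     if n <= 0:
--         return []
--
--     cat_groups: dict[str, list] = defaultdict(list)
--     other: list[dict] = []
--     for item in data:
--         cat = item.get("category", "")
--         if cat in main_cats:
--             cat_groups[cat].append(item)
--         else:
--             other.append(item)
--
--     per_cat, extra = divmod(n, len(main_cats))
--
--     selected: list[dict] = []
--     for i, cat in enumerate(main_cats):
--         quota = per_cat + (1 if i < extra else 0)
--         sub_groups: dict[str, list] = defaultdict(list)
--         for item in cat_groups[cat]:
--             sub_groups[item.get("subcategory", "")].append(item)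
--         # flatten the subcategory groups round-robin (column by column) ...
--         groups = list(sub_groups.values())
--         interleaved: list[dict] = []
--         while groups:
--             interleaved.extend(g[0] for g in groups if g)
--             groups = [g[1:] for g in groups if len(g) > 1]
--         # ... and take the quota by slicing
--         selected.extend(interleaved[:quota])
--
--     need = n - len(selected)
--     if need > 0:
--         selected.extend(other[:need])
--     return selected
-- ===== Notes on version B (the rewrite author's own statement) =====
-- stated objective: alternative
-- what changed: Per category, B flattens the subcategory groups round-robin once (column-by-column while-loop) and takes the quota by slicing, instead of A's counted draining loop that pops queues one element at a time with an in-pass quota cutoff; the 'other' top-up loop becomes a single slice.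
import Mathlib
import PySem

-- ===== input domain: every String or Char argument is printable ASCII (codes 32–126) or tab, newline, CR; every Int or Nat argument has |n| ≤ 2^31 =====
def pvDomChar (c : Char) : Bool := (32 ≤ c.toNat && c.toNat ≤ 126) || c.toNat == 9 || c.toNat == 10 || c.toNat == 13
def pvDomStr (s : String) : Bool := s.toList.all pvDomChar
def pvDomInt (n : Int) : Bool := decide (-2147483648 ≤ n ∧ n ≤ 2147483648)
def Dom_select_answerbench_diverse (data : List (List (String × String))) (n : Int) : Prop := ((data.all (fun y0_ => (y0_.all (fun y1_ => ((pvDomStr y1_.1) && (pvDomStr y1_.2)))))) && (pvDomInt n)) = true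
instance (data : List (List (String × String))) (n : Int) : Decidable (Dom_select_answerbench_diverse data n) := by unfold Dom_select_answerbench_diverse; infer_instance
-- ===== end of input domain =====

-- B replaces A's counted queue-draining loop (pop(0) with an in-pass quota cutoff) by a full
-- round-robin flatten of the subcategory groups followed by a slice to the quota, and the
-- 'other' top-up loop by a single slice; objective: alternative decomposition (same cost).

-- ===== PORT A =====
-- shared with PORT B (identical in both Pythons): item.get(key, ""), the main_cats constant,
-- the category/other grouping fold and the per-category subcategory grouping (defaultdict append).
abbrev PvItm := List (String × String)

def pvGet (item : PvItm) (key : String) : String :=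
  (PySem.Dict.mk item).getD key ""       -- item.get(key, ""): first match in the assoc list

def pvMainCats : List String := ["Algebra", "Combinatorics", "Geometry", "Number theory"]

-- the `for item in data` grouping loop (defaultdict append / other append)
def pvGroupStep (st : PySem.Dict String (List PvItm) × List PvItm) (item : PvItm) :
    PySem.Dict String (List PvItm) × List PvItm :=
  let cat := pvGet item "category"
  if pvMainCats.contains cat then (st.1.modify cat [] (· ++ [item]), st.2)
  else (st.1, st.2 ++ [item])

-- `sub_groups[item.get("subcategory","")].append(item)` over items
def pvSubGroups (items : List PvItm) : PySem.Dict String (List PvItm) :=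
  items.foldl (fun d item => d.modify (pvGet item "subcategory") [] (· ++ [item])) PySem.Dict.empty

def pvTotalLen (qs : List (List PvItm)) : Nat := (qs.map List.length).sum

-- A-side: one pass of the `for q in sub_queues` loop (pop(0) while taken < quota);
-- returns (queues after the pass, items appended, taken, progress)
def pvPassOnce (qs : List (List PvItm)) (taken quota : Int) :
    List (List PvItm) × List PvItm × Int × Bool :=
  match qs with
  | [] => ([], [], taken, false)
  | q :: rest =>
    if h : q ≠ [] ∧ taken < quota then
      let r := pvPassOnce rest (taken + 1) quota
      (q.drop 1 :: r.1, q.head h.1 :: r.2.1, r.2.2.1, true)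
    else
      let r := pvPassOnce rest taken quota
      (q :: r.1, r.2.1, r.2.2.1, r.2.2.2)

-- A-side: the `while taken < quota` loop; fuel (totalLen+1 at the call site) only guarantees
-- termination — every productive pass removes at least one queued item, so it is never exhausted
def pvDrain : Nat → List (List PvItm) → Int → Int → List PvItm → List PvItm
  | 0, _, _, _, sel => sel
  | fuel + 1, qs, taken, quota, sel =>
    if taken < quota then
      let r := pvPassOnce qs taken quota
      let sel' := sel ++ r.2.1
      if r.2.2.2 then pvDrain fuel r.1 r.2.2.1 quota sel' else sel'
    else sel

-- A-side: `for item in other: if len(selected) >= n: break; selected.append(item)`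
def pvFillOther : List PvItm → List PvItm → Int → List PvItm
  | [], sel, _ => sel
  | item :: rest, sel, n => if n ≤ (sel.length : Int) then sel else pvFillOther rest (sel ++ [item]) n

def select_answerbench_diverse (data : List (List (String × String))) (n : Int) :
    List (List (String × String)) :=
  let st := data.foldl pvGroupStep ((PySem.Dict.empty : PySem.Dict String (List PvItm)), ([] : List PvItm))
  let cat_groups := st.1
  let other := st.2
  let per_cat := PySem.Int.floordiv n (pvMainCats.length : Int)
  let extra := PySem.Int.mod n (pvMainCats.length : Int)
  let selected := (PySem.List.enumerate pvMainCats 0).foldl (fun sel ic =>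
      let quota := per_cat + (if ic.1 < extra then 1 else 0)
      let sub_queues := (pvSubGroups (cat_groups.getD ic.2 [])).values
      pvDrain (pvTotalLen sub_queues + 1) sub_queues 0 quota sel) []
  let selected := pvFillOther other selected n
  PySem.List.slice selected none (some n)

-- ===== PORT B =====
-- B-side: the `while groups:` round-robin flatten (heads of the groups, then recurse on the
-- tails of the groups longer than one); fuel (totalLen+1 at the call site) only guards termination
def pvFlattenRR : Nat → List (List PvItm) → List PvItm
  | 0, _ => []
  | fuel + 1, groups =>
    if groups.isEmpty then [] else
      groups.filterMap List.head? ++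
      pvFlattenRR fuel ((groups.filter (fun g => 1 < g.length)).map (List.drop 1))

def select_answerbench_diverse_alt (data : List (List (String × String))) (n : Int) :
    List (List (String × String)) :=
  if n ≤ 0 then [] else
  let st := data.foldl pvGroupStep ((PySem.Dict.empty : PySem.Dict String (List PvItm)), ([] : List PvItm))
  let cat_groups := st.1
  let other := st.2
  -- divmod(n, len(main_cats)); the divisor is the nonzero literal 4, so divmod returns
  let per_cat := PySem.Int.floordiv n (pvMainCats.length : Int)
  let extra := PySem.Int.mod n (pvMainCats.length : Int)
  let selected := (PySem.List.enumerate pvMainCats 0).foldl (fun sel ic =>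
      let quota := per_cat + (if ic.1 < extra then 1 else 0)
      let groups := (pvSubGroups (cat_groups.getD ic.2 [])).values
      let interleaved := pvFlattenRR (pvTotalLen groups + 1) groups
      sel ++ PySem.List.slice interleaved none (some quota)) []
  let need := n - (selected.length : Int)
  if 0 < need then selected ++ PySem.List.slice other none (some need) else selected

-- ===== PRECONDITION & SPEC =====
def Spec_select_answerbench_diverse (data : List (List (String × String))) (n : Int) (out : List (List (String × String))) : Prop := out = select_answerbench_diverse_alt data n
instance (data : List (List (String × String))) (n : Int) (out : List (List (String × String))) : Decidable (Spec_select_answerbench_diverse data n out) := by unfold Spec_select_answerbench_diverse; infer_instance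

-- ===== CLAIM (what is proved, stated in full; the proofs are below) =====
def Claim_equal_select_answerbench_diverse : Prop := ∀ (data : List (List (String × String))) (n : Int), Dom_select_answerbench_diverse data n → Spec_select_answerbench_diverse data n (select_answerbench_diverse data n)

-- ===== LEMMAS AND PROOFS =====

-- number of nonempty queues (= number of items one full pass takes)
def pvCnt (qs : List (List PvItm)) : Nat := qs.countP (fun g => !g.isEmpty)

theorem pvCnt_eq_length_heads (qs : List (List PvItm)) :
    (qs.filterMap List.head?).length = pvCnt qs := by
  induction qs with
  | nil => rfl
  | cons q rest ih =>
    cases q <;> simp [pvCnt] at ih ⊢ <;> omega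

theorem pvTotalLen_map_drop (qs : List (List PvItm)) :
    pvTotalLen (qs.map (List.drop 1)) + pvCnt qs = pvTotalLen qs := by
  induction qs with
  | nil => rfl
  | cons q rest ih =>
    cases q <;> simp [pvTotalLen, pvCnt] at * <;> omega

theorem pvTotalLen_filter_big (qs : List (List PvItm)) :
    pvTotalLen ((qs.filter (fun g => 1 < g.length)).map (List.drop 1)) =
      pvTotalLen (qs.map (List.drop 1)) := by
  induction qs with
  | nil => rfl
  | cons q rest ih =>
    simp only [pvTotalLen, List.map_map] at ih ⊢
    by_cases h : 1 < q.length
    · simp [h, ih]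
    · have hq : q.drop 1 = [] := List.drop_eq_nil_iff.2 (by omega)
      simp [h, hq, ih]

theorem pvFlattenRR_nil (f : Nat) : pvFlattenRR f [] = [] := by
  cases f <;> simp [pvFlattenRR]

theorem pvFlattenRR_all_empty (f : Nat) (qs : List (List PvItm))
    (h : qs.filterMap List.head? = []) : pvFlattenRR f qs = [] := by
  cases f with
  | zero => rfl
  | succ f =>
    by_cases hq : qs.isEmpty
    · simp [pvFlattenRR, hq]
    · have hall : ∀ g ∈ qs, g = [] := by
        intro g hg
        have := (List.filterMap_eq_nil_iff.1 h) g hg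
        cases g <;> simp_all
      have hfil : qs.filter (fun g => 1 < g.length) = [] := by
        rw [List.filter_eq_nil_iff]
        intro g hg
        simp [hall g hg]
      simp [pvFlattenRR, hq, h, hfil, pvFlattenRR_nil]

theorem pvFilterMapHead_filter (qs : List (List PvItm)) :
    (qs.filter (fun g => !g.isEmpty)).filterMap List.head? = qs.filterMap List.head? := by
  induction qs with
  | nil => rfl
  | cons g rest ih => cases g <;> simp [ih]

-- the flatten ignores empty groups
theorem pvFlattenRR_filter (f : Nat) (qs : List (List PvItm)) :
    pvFlattenRR f (qs.filter (fun g => !g.isEmpty)) = pvFlattenRR f qs := by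
  cases f with
  | zero => rfl
  | succ f =>
    by_cases hq : (qs.filter (fun g => !g.isEmpty)).isEmpty
    · have hh : qs.filterMap List.head? = [] := by
        rw [List.filterMap_eq_nil_iff]
        intro g hg
        cases g with
        | nil => rfl
        | cons a t =>
          exfalso
          simp [List.isEmpty_iff] at hq
          simpa using hq _ hg
      rw [pvFlattenRR_all_empty _ _ hh]
      simp [pvFlattenRR, hq]
    · have hq' : qs.isEmpty = false := by
        cases qs with
        | nil => simp at hq
        | cons _ _ => rfl
      have hbig : (qs.filter (fun g => !g.isEmpty)).filter (fun g => 1 < g.length) =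
          qs.filter (fun g => 1 < g.length) := by
        rw [List.filter_filter]
        congr 1
        funext g
        cases g <;> simp
      simp only [pvFlattenRR, hq, hq', if_false, Bool.false_eq_true, pvFilterMapHead_filter, hbig]

theorem pvFlattenRR_fuel (f1 f2 : Nat) (qs : List (List PvItm))
    (h1 : pvTotalLen qs < f1) (h2 : pvTotalLen qs < f2) :
    pvFlattenRR f1 qs = pvFlattenRR f2 qs := by
  induction f1 generalizing f2 qs with
  | zero => omega
  | succ f1 ih =>
    cases f2 with
    | zero => omega
    | succ f2 =>
      by_cases hh : qs.filterMap List.head? = []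
      · rw [pvFlattenRR_all_empty _ _ hh, pvFlattenRR_all_empty _ _ hh]
      · have hq : qs.isEmpty = false := by cases qs <;> simp_all
        have hcnt : 1 ≤ pvCnt qs := by
          rw [← pvCnt_eq_length_heads]
          cases hx : qs.filterMap List.head? <;> simp_all
        have h3 := pvTotalLen_map_drop qs
        have hnext := pvTotalLen_filter_big qs
        simp only [pvFlattenRR, hq, if_false, Bool.false_eq_true]
        refine congrArg (qs.filterMap List.head? ++ ·) ?_
        exact ih _ _ (by omega) (by omega)

theorem pvPassOnce_stop (qs : List (List PvItm)) (taken quota : Int) (h : quota ≤ taken) :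
    pvPassOnce qs taken quota = (qs, [], taken, false) := by
  induction qs with
  | nil => rfl
  | cons q rest ih =>
    have : ¬ (q ≠ [] ∧ taken < quota) := by rintro ⟨_, h2⟩; omega
    simp [pvPassOnce, this, ih]

theorem pvPassOnce_full (qs : List (List PvItm)) (taken quota : Int)
    (h : ((qs.filterMap List.head?).length : Int) ≤ quota - taken) :
    pvPassOnce qs taken quota =
      (qs.map (List.drop 1), qs.filterMap List.head?, taken + (qs.filterMap List.head?).length,
        !(qs.filterMap List.head?).isEmpty) := by
  induction qs generalizing taken with
  | nil => simp [pvPassOnce]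
  | cons q rest ih =>
    cases q with
    | nil =>
      have hcond : ¬ (([] : List PvItm) ≠ [] ∧ taken < quota) := by simp
      simp only [pvPassOnce, dif_neg hcond]
      rw [ih taken (by simpa using h)]
      simp
    | cons a t =>
      have hlen : (((a :: t) :: rest).filterMap List.head?).length
          = (rest.filterMap List.head?).length + 1 := by simp
      have htk : taken < quota := by rw [hlen] at h; push_cast at h; omega
      have hcond : ((a :: t) : List PvItm) ≠ [] ∧ taken < quota := ⟨by simp, htk⟩
      simp only [pvPassOnce, dif_pos hcond]
      rw [ih (taken + 1) (by rw [hlen] at h; push_cast at h ⊢; omega)]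
      simp [List.head]
      omega

theorem pvPassOnce_part (qs : List (List PvItm)) (taken quota : Int)
    (h1 : taken < quota) (h2 : quota - taken < ((qs.filterMap List.head?).length : Int)) :
    (pvPassOnce qs taken quota).2.1 = (qs.filterMap List.head?).take (quota - taken).toNat ∧
    (pvPassOnce qs taken quota).2.2.1 = quota ∧ (pvPassOnce qs taken quota).2.2.2 = true := by
  induction qs generalizing taken with
  | nil => simp at h2; omega
  | cons q rest ih =>
    cases q with
    | nil =>
      have hcond : ¬ (([] : List PvItm) ≠ [] ∧ taken < quota) := by simp
      simp only [pvPassOnce, dif_neg hcond]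
      exact ih taken h1 (by simpa using h2)
    | cons a t =>
      have hcond : ((a :: t) : List PvItm) ≠ [] ∧ taken < quota := ⟨by simp, h1⟩
      simp only [pvPassOnce, dif_pos hcond]
      by_cases hlt : taken + 1 < quota
      · have h2' : quota - (taken + 1) < ((rest.filterMap List.head?).length : Int) := by
          simp at h2; omega
        have hrec := ih (taken + 1) hlt h2'
        refine ⟨?_, hrec.2.1, by trivial⟩
        have hk : (quota - taken).toNat = (quota - (taken + 1)).toNat + 1 := by omega
        rw [hk]
        simpa [List.head] using congrArg (List.cons a) hrec.1
      · have heq : quota = taken + 1 := by omega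
        rw [pvPassOnce_stop rest (taken + 1) quota (by omega)]
        have hk : (quota - taken).toNat = 1 := by omega
        simp [List.head, heq]

-- the heart: A's counted draining equals B's flatten-then-slice
theorem pvDrain_eq_flatten (fa : Nat) (qs : List (List PvItm)) (taken quota : Int)
    (sel : List PvItm) (hfa : pvTotalLen qs < fa) :
    pvDrain fa qs taken quota sel =
      sel ++ (pvFlattenRR (pvTotalLen qs + 1) qs).take (quota - taken).toNat := by
  induction fa generalizing qs taken sel with
  | zero => omega
  | succ fa ih =>
    by_cases htq : taken < quota
    · simp only [pvDrain, if_pos htq]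
      by_cases hc : (((qs.filterMap List.head?).length : Int)) ≤ quota - taken
      · rw [pvPassOnce_full qs taken quota hc]
        by_cases hhe : qs.filterMap List.head? = []
        · rw [pvFlattenRR_all_empty _ _ hhe, hhe]
          simp
        · have hprog : (!(qs.filterMap List.head?).isEmpty) = true := by
            cases hx : qs.filterMap List.head? <;> simp_all
          simp only [hprog, if_pos]
          have hqne : qs.isEmpty = false := by
            cases qs with
            | nil => simp at hhe
            | cons _ _ => rfl
          have hcnt1 : 1 ≤ pvCnt qs := by
            rw [← pvCnt_eq_length_heads]
            cases hx : qs.filterMap List.head? <;> simp_all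
          have htot := pvTotalLen_map_drop qs
          have hfa' : pvTotalLen (qs.map (List.drop 1)) < fa := by omega
          rw [ih (qs.map (List.drop 1)) (taken + (qs.filterMap List.head?).length) (sel ++ qs.filterMap List.head?) hfa']
          rw [show pvFlattenRR (pvTotalLen qs + 1) qs =
              qs.filterMap List.head? ++ pvFlattenRR (pvTotalLen qs)
                ((qs.filter (fun g => 1 < g.length)).map (List.drop 1)) by
            simp [pvFlattenRR, hqne]]
          have hflat : pvFlattenRR (pvTotalLen (qs.map (List.drop 1)) + 1) (qs.map (List.drop 1)) =
              pvFlattenRR (pvTotalLen qs) ((qs.filter (fun g => 1 < g.length)).map (List.drop 1)) := by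
            have hfm : ((qs.map (List.drop 1)).filter (fun g => !g.isEmpty)) =
                (qs.filter (fun g => 1 < g.length)).map (List.drop 1) := by
              rw [List.filter_map]
              congr 1
              apply List.filter_congr
              intro g _
              cases g with
              | nil => simp
              | cons a t => cases t <;> simp
            calc pvFlattenRR (pvTotalLen (qs.map (List.drop 1)) + 1) (qs.map (List.drop 1))
                = pvFlattenRR (pvTotalLen (qs.map (List.drop 1)) + 1)
                    ((qs.map (List.drop 1)).filter (fun g => !g.isEmpty)) := by
                  rw [pvFlattenRR_filter]
              _ = pvFlattenRR (pvTotalLen qs)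
                    ((qs.filter (fun g => 1 < g.length)).map (List.drop 1)) := by
                  rw [hfm]
                  apply pvFlattenRR_fuel
                  · rw [pvTotalLen_filter_big]; omega
                  · rw [pvTotalLen_filter_big]; omega
          rw [hflat, List.append_assoc]
          congr 1
          have hsplit : (quota - taken).toNat
              = (qs.filterMap List.head?).length + (quota - (taken + (qs.filterMap List.head?).length)).toNat := by
            omega
          rw [hsplit, List.take_length_add_append]
      · rw [not_le] at hc
        obtain ⟨hp1, hp2, hp3⟩ := pvPassOnce_part qs taken quota htq hc
        rw [hp3]
        simp only [if_pos]
        rw [hp1, hp2]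
        have hstop : ∀ f sel', pvDrain f (pvPassOnce qs taken quota).1 quota quota sel' = sel' := by
          intro f sel'
          cases f with
          | zero => rfl
          | succ f => simp [pvDrain]
        rw [hstop]
        have hqne : qs.isEmpty = false := by
          cases qs with
          | nil => simp at hc; omega
          | cons _ _ => rfl
        rw [show pvFlattenRR (pvTotalLen qs + 1) qs =
            qs.filterMap List.head? ++ pvFlattenRR (pvTotalLen qs)
              ((qs.filter (fun g => 1 < g.length)).map (List.drop 1)) by
          simp [pvFlattenRR, hqne]]
        rw [List.take_append_of_le_length (by omega)]
    · simp only [pvDrain, if_neg htq]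
      have h0 : (quota - taken).toNat = 0 := by omega
      simp [h0]

-- B's slice-to-quota is a take, for a nonnegative bound
theorem pvSlice_to_nonneg (xs : List PvItm) (b : Int) (hb : 0 ≤ b) :
    PySem.List.slice xs none (some b) = xs.take b.toNat := by
  conv_lhs => rw [show b = ((b.toNat : Nat) : Int) by omega]
  rw [PySem.List.slice_to_natCast]

theorem pvSlice_nil (n : Int) : PySem.List.slice ([] : List PvItm) none (some n) = [] := by
  simp [PySem.List.slice]

theorem pvFillOther_eq (other : List PvItm) (sel : List PvItm) (n : Int) :
    pvFillOther other sel n = sel ++ other.take (n - sel.length).toNat := by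
  induction other generalizing sel with
  | nil => simp [pvFillOther]
  | cons x rest ih =>
    by_cases h : n ≤ (sel.length : Int)
    · have : (n - (sel.length : Int)).toNat = 0 := by omega
      simp [pvFillOther, h, this]
    · have hk : (n - (sel.length : Int)).toNat = (n - ((sel ++ [x]).length : Int)).toNat + 1 := by
        simp; omega
      simp only [pvFillOther, if_neg h]
      rw [ih (sel ++ [x]), hk]
      simp

theorem pvDrain_nonpos (fuel : Nat) (qs : List (List PvItm)) (quota : Int) (sel : List PvItm)
    (h : quota ≤ 0) : pvDrain (fuel + 1) qs 0 quota sel = sel := by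
  simp [pvDrain, show ¬ ((0 : Int) < quota) by omega]

theorem pvFoldl_id_of_mem {β : Type} (l : List β) (f : List PvItm → β → List PvItm)
    (init : List PvItm) (h : ∀ s x, x ∈ l → f s x = s) : l.foldl f init = init := by
  induction l generalizing init with
  | nil => rfl
  | cons x rest ih =>
    rw [List.foldl_cons, h init x (by simp)]
    exact ih _ (fun s y hy => h s y (by simp [hy]))

theorem pvFoldl_len_le {β : Type} (l : List β) (f : List PvItm → β → List PvItm)
    (g : β → Nat) (init : List PvItm)
    (h : ∀ s x, x ∈ l → (f s x).length ≤ s.length + g x) :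
    (l.foldl f init).length ≤ init.length + (l.map g).sum := by
  induction l generalizing init with
  | nil => simp
  | cons x rest ih =>
    rw [List.foldl_cons]
    have h1 := h init x (by simp)
    have h2 := ih (f init x) (fun s y hy => h s y (by simp [hy]))
    simp only [List.map_cons, List.sum_cons]
    omega

-- ===== VERDICT (by name: the statement is the Claim_ definition above) =====
theorem select_answerbench_diverse_spec : Claim_equal_select_answerbench_diverse := by
  intro data n _
  unfold Spec_select_answerbench_diverse
  unfold select_answerbench_diverse select_answerbench_diverse_alt
  generalize data.foldl pvGroupStep ((PySem.Dict.empty : PySem.Dict String (List PvItm)), ([] : List PvItm)) = st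
  obtain ⟨cg, other⟩ := st
  dsimp only
  simp only [show ((pvMainCats.length : Nat) : Int) = 4 from by simp [pvMainCats]]
  have h4 : (0 : Int) < 4 := by omega
  by_cases hn : n ≤ 0
  · rw [if_pos hn]
    have hfold : (PySem.List.enumerate pvMainCats 0).foldl (fun sel ic =>
        pvDrain (pvTotalLen (pvSubGroups (cg.getD ic.2 [])).values + 1)
          (pvSubGroups (cg.getD ic.2 [])).values 0
          (PySem.Int.floordiv n 4 + if ic.1 < PySem.Int.mod n 4 then 1 else 0) sel) []
        = [] := by
      apply pvFoldl_id_of_mem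
      intro sel ic hic
      obtain ⟨k, hk, hp⟩ := (PySem.List.mem_enumerate_iff pvMainCats 0 ic).1 hic
      have h0 : 0 ≤ ic.1 := by rw [hp]; omega
      apply pvDrain_nonpos
      rcases lt_or_eq_of_le hn with hlt | he
      · have hpc : PySem.Int.floordiv n 4 < 0 := (PySem.Int.floordiv_lt_iff_lt_mul h4).2 (by omega)
        split_ifs <;> omega
      · subst he
        have e1 : PySem.Int.floordiv 0 4 = 0 := by decide
        have e2 : PySem.Int.mod 0 4 = 0 := by decide
        rw [e1, e2, if_neg (by omega)]
        omega
    rw [hfold]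
    have hfill : pvFillOther other [] n = [] := by
      rw [pvFillOther_eq]
      have h0 : (n - (([] : List PvItm).length : Int)).toNat = 0 := by simp; omega
      rw [h0, List.take_zero, List.nil_append]
    rw [hfill, pvSlice_nil]
  · rw [if_neg hn]
    have hpc0 : 0 ≤ PySem.Int.floordiv n 4 := (PySem.Int.le_floordiv_iff_mul_le h4).2 (by omega)
    have hex0 : 0 ≤ PySem.Int.mod n 4 := PySem.Int.mod_nonneg n h4
    have hex4 : PySem.Int.mod n 4 < 4 := PySem.Int.mod_lt n h4
    have hsum : PySem.Int.floordiv n 4 * 4 + PySem.Int.mod n 4 = n := PySem.Int.floordiv_mul_add_mod n 4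
    -- the two per-category folds agree
    rw [PySem.List.foldl_congr_mem (PySem.List.enumerate pvMainCats 0)
      (fun sel ic =>
        pvDrain (pvTotalLen (pvSubGroups (cg.getD ic.2 [])).values + 1)
          (pvSubGroups (cg.getD ic.2 [])).values 0
          (PySem.Int.floordiv n 4 + if ic.1 < PySem.Int.mod n 4 then 1 else 0) sel)
      (fun sel ic =>
        sel ++ PySem.List.slice
          (pvFlattenRR (pvTotalLen (pvSubGroups (cg.getD ic.2 [])).values + 1)
            (pvSubGroups (cg.getD ic.2 [])).values)
          none (some (PySem.Int.floordiv n 4 + if ic.1 < PySem.Int.mod n 4 then 1 else 0))) []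
      (by
        intro sel ic hic
        dsimp only
        obtain ⟨k, hk, hp⟩ := (PySem.List.mem_enumerate_iff pvMainCats 0 ic).1 hic
        have h0 : 0 ≤ ic.1 := by rw [hp]; omega
        have hq0 : 0 ≤ PySem.Int.floordiv n 4 + (if ic.1 < PySem.Int.mod n 4 then (1:Int) else 0) := by
          split_ifs <;> omega
        rw [pvDrain_eq_flatten (pvTotalLen (pvSubGroups (cg.getD ic.2 [])).values + 1) _ 0 _ sel
          (Nat.lt_succ_self _)]
        rw [pvSlice_to_nonneg _ _ hq0]
        simp)]
    -- length of the selection is at most n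
    have hSlen : ((PySem.List.enumerate pvMainCats 0).foldl (fun sel ic =>
        sel ++ PySem.List.slice
          (pvFlattenRR (pvTotalLen (pvSubGroups (cg.getD ic.2 [])).values + 1)
            (pvSubGroups (cg.getD ic.2 [])).values)
          none (some (PySem.Int.floordiv n 4 + if ic.1 < PySem.Int.mod n 4 then 1 else 0))) []).length
        ≤ n.toNat := by
      have hb := pvFoldl_len_le (PySem.List.enumerate pvMainCats 0)
        (fun sel ic =>
          sel ++ PySem.List.slice
            (pvFlattenRR (pvTotalLen (pvSubGroups (cg.getD ic.2 [])).values + 1)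
              (pvSubGroups (cg.getD ic.2 [])).values)
            none (some (PySem.Int.floordiv n 4 + if ic.1 < PySem.Int.mod n 4 then 1 else 0)))
        (fun ic => (PySem.Int.floordiv n 4 + if ic.1 < PySem.Int.mod n 4 then (1:Int) else 0).toNat) []
        (by
          intro sel ic hic
          dsimp only
          obtain ⟨k, hk, hp⟩ := (PySem.List.mem_enumerate_iff pvMainCats 0 ic).1 hic
          have h0 : 0 ≤ ic.1 := by rw [hp]; omega
          have hq0 : 0 ≤ PySem.Int.floordiv n 4 + (if ic.1 < PySem.Int.mod n 4 then (1:Int) else 0) := by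
            split_ifs <;> omega
          rw [pvSlice_to_nonneg _ _ hq0]
          simp [List.length_take])
      refine le_trans hb ?_
      simp only [pvMainCats, PySem.List.enumerate_cons, PySem.List.enumerate_nil,
        List.map_cons, List.map_nil, List.sum_cons, List.sum_nil]
      norm_num
      split_ifs <;> omega
    generalize hS : (PySem.List.enumerate pvMainCats 0).foldl (fun sel ic =>
        sel ++ PySem.List.slice
          (pvFlattenRR (pvTotalLen (pvSubGroups (cg.getD ic.2 [])).values + 1)
            (pvSubGroups (cg.getD ic.2 [])).values)
          none (some (PySem.Int.floordiv n 4 + if ic.1 < PySem.Int.mod n 4 then 1 else 0))) [] = S at hSlen ⊢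
    rw [pvFillOther_eq, pvSlice_to_nonneg _ _ (by omega : (0:Int) ≤ n)]
    rw [List.take_of_length_le (by simp [List.length_take]; omega)]
    by_cases hneed : 0 < n - (S.length : Int)
    · rw [if_pos hneed, pvSlice_to_nonneg _ _ (le_of_lt hneed)]
    · rw [if_neg hneed]
      have h0 : (n - (S.length : Int)).toNat = 0 := by omega
      simp [h0]
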